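-- pv_equiv track=rewrite | github.com/DannyLee12/dcp | _2020/11_November/265.py | bonuses
-- ===== SOURCE A (Python) =====
-- def bonuses(l: list) -> list:
--     """Return the minimum amount of bonuses that can be returned"""
--     n = len(l)
--     bonus_list = [1] * n
--
--     for i, loc in enumerate(l):
--         if i == 0:
--             continue
--         if loc > l[i - 1]:
--             bonus_list[i] = bonus_list[i-1] + 1
--
--     for j, loc in enumerate(reversed(l)):
--         if j == 0:
--             continue
--         if loc > l[n - j]:
--             bonus_list[n - j - 1] = max(bonus_list[n - j] + 1,
--                                         bonus_list[n - j - 1])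
--
--     return bonus_list
-- ===== SOURCE B (Python) =====
-- def bonuses(l: list) -> list:
--     """Return the minimum amount of bonuses that can be returned"""
--     n = len(l)
--     res = []
--     up = 1  # bonus forced by the ascending slope arriving at position i
--     i = 0
--     while i < n:
--         # d = length of the maximal strictly decreasing run starting at i
--         d = 0
--         while i + d + 1 < n and l[i + d + 1] < l[i + d]:
--             d += 1
--         # head of the run needs max(up, d + 1); the rest of the run counts down to 1
--         res.append(max(up, d + 1))
--         res.extend(range(d, 0, -1))
--         # incoming up-value for the element right after the run
--         if i + d + 1 < n:
--             up = res[-1] + 1 if l[i + d + 1] > l[i + d] else 1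
--         i += d + 1
--     return res
-- ===== Notes on version B (the rewrite author's own statement) =====
-- stated objective: alternative
-- what changed: Replaces the two array passes (forward rise pass, then backward max-merge pass over the same array) with a single left-to-right sweep that detects each maximal strictly decreasing run, emits max(up, d+1) for its head and d..1 for its tail, and threads the ascending-slope value 'up' across runs.
import Mathlib
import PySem

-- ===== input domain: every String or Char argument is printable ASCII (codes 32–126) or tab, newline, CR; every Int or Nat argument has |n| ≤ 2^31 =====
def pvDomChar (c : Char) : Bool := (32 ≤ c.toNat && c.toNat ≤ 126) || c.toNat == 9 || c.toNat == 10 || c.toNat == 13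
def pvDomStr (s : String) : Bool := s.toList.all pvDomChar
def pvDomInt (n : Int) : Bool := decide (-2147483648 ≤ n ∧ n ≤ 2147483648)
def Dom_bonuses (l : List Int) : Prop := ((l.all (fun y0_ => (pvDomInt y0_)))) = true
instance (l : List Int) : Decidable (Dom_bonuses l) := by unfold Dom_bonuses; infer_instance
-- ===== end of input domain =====

-- B replaces A's two array passes by one run-detecting sweep; same return value (alternative decomposition, not faster).

-- ===== PORT A =====
-- Literal port of A: indices read inside both loops are always in range, so pyGetD/pySetD are exact.
def bonuses (l : List Int) : List Int :=
  let n : Int := PySem.List.len l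
  let bonus_list : List Int := List.replicate l.length (1 : Int)
  let bonus_list := (PySem.List.enumerate l 0).foldl (fun bl p =>
    if p.1 == 0 then bl
    else if p.2 > PySem.List.pyGetD l (p.1 - 1) 0 then
      PySem.List.pySetD bl p.1 (PySem.List.pyGetD bl (p.1 - 1) 0 + 1)
    else bl) bonus_list
  let bonus_list := (PySem.List.enumerate l.reverse 0).foldl (fun bl p =>
    if p.1 == 0 then bl
    else if p.2 > PySem.List.pyGetD l (n - p.1) 0 then
      PySem.List.pySetD bl (n - p.1 - 1)
        (max (PySem.List.pyGetD bl (n - p.1) 0 + 1) (PySem.List.pyGetD bl (n - p.1 - 1) 0))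
    else bl) bonus_list
  bonus_list

-- ===== PORT B =====
-- inner while loop of Source B: length d of the maximal strictly decreasing run starting at i
-- (the bound check guards every index read, so getD is exact)
def bGoD (l : List Int) (i d : Nat) : Nat :=
  if i + d + 1 < l.length ∧ l.getD (i + d + 1) 0 < l.getD (i + d) 0 then
    bGoD l i (d + 1)
  else d
termination_by l.length - (i + d)
decreasing_by omega

-- outer while loop of Source B, state (up, i, res)
def bGo (l : List Int) (up : Int) (i : Nat) (res : List Int) : List Int :=
  if _h : i < l.length then
    let d := bGoD l i 0
    let res' := (res ++ [max up ((d : Int) + 1)]) ++ PySem.List.pyRange (d : Int) 0 (-1)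
    let up' := if i + d + 1 < l.length then
        (if l.getD (i + d + 1) 0 > l.getD (i + d) 0 then PySem.List.pyGetD res' (-1) 0 + 1 else 1)
      else up
    bGo l up' (i + d + 1) res'
  else res
termination_by l.length - i
decreasing_by omega

def bonuses_alt (l : List Int) : List Int := bGo l 1 0 []

-- ===== PRECONDITION & SPEC =====
def Spec_bonuses (l : List Int) (out : List Int) : Prop := out = bonuses_alt l
instance (l : List Int) (out : List Int) : Decidable (Spec_bonuses l out) := by unfold Spec_bonuses; infer_instance

-- ===== CLAIM (what is proved, stated in full; the proofs are below) =====
def Claim_equal_bonuses : Prop := ∀ (l : List Int), Dom_bonuses l → Spec_bonuses l (bonuses l)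

-- ===== LEMMAS AND PROOFS =====

-- the two loop bodies of port A, named for the proofs (definitionally equal to the inlined lambdas)
def f1 (l : List Int) (bl : List Int) (p : Int × Int) : List Int :=
  if p.1 == 0 then bl
  else if p.2 > PySem.List.pyGetD l (p.1 - 1) 0 then
    PySem.List.pySetD bl p.1 (PySem.List.pyGetD bl (p.1 - 1) 0 + 1)
  else bl

def f2 (l : List Int) (bl : List Int) (p : Int × Int) : List Int :=
  if p.1 == 0 then bl
  else if p.2 > PySem.List.pyGetD l (PySem.List.len l - p.1) 0 then
    PySem.List.pySetD bl (PySem.List.len l - p.1 - 1)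
      (max (PySem.List.pyGetD bl (PySem.List.len l - p.1) 0 + 1)
           (PySem.List.pyGetD bl (PySem.List.len l - p.1 - 1) 0))
  else bl

-- reference: the "rise" value at index i (A's first pass, pointwise)
def uI (l : List Int) : Nat → Int
  | 0 => 1
  | i + 1 => if l.getD i 0 < l.getD (i + 1) 0 then uI l i + 1 else 1

-- reference: the "fall" value at index i (length of the strictly decreasing run starting at i)
def dI (l : List Int) (i : Nat) : Int :=
  if i + 1 < l.length ∧ l.getD (i + 1) 0 < l.getD i 0 then dI l (i + 1) + 1 else 1
termination_by l.length - i
decreasing_by omega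

def mI (l : List Int) (i : Nat) : Int := max (uI l i) (dI l i)

lemma uI_pos (l : List Int) (i : Nat) : 1 ≤ uI l i := by
  cases i with
  | zero => simp [uI]
  | succ i =>
    rw [uI]
    split
    · have := uI_pos l i; omega
    · omega

lemma dI_pos (l : List Int) (i : Nat) : 1 ≤ dI l i := by
  rw [dI]
  split
  · have := dI_pos l (i + 1); omega
  · omega
termination_by l.length - i
decreasing_by omega

lemma uI_succ_of_desc (l : List Int) (i : Nat) (h : l.getD (i + 1) 0 < l.getD i 0) :
    uI l (i + 1) = 1 := by
  rw [uI]; rw [if_neg (by omega)]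

lemma dI_last (l : List Int) (i : Nat) (h : ¬ (i + 1 < l.length ∧ l.getD (i + 1) 0 < l.getD i 0)) :
    dI l i = 1 := by
  rw [dI, if_neg h]

-- key step: merging with the already-finalised right neighbour yields max(uI, dI)
lemma key_desc (l : List Int) (i : Nat) (h1 : i + 1 < l.length)
    (h2 : l.getD (i + 1) 0 < l.getD i 0) :
    max (mI l (i + 1) + 1) (uI l i) = mI l i := by
  have hu : uI l (i + 1) = 1 := uI_succ_of_desc l i h2
  have hd : dI l i = dI l (i + 1) + 1 := by rw [dI, if_pos ⟨h1, h2⟩]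
  have hdp := dI_pos l (i + 1)
  have hup := uI_pos l i
  simp only [mI, hu, hd]
  omega

lemma key_nodesc (l : List Int) (i : Nat)
    (h : ¬ (i + 1 < l.length ∧ l.getD (i + 1) 0 < l.getD i 0)) :
    mI l i = uI l i := by
  have h1 := dI_last l i h
  have h2 := uI_pos l i
  simp only [mI, h1]
  omega

lemma getD_set_lt (b : List Int) (k : Nat) (v : Int) (hk : k < b.length) (i : Nat) :
    (b.set k v).getD i 0 = if i = k then v else b.getD i 0 := by
  simp only [List.getD_eq_getElem?_getD, List.getElem?_set]
  by_cases hik : i = k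
  · subst hik; simp [hk]
  · simp [Ne.symm hik, hik]

-- ===== pass 1 =====
lemma pass1 (l : List Int) :
    ∀ (ys : List Int) (k : Nat) (b : List Int),
      ys = l.drop k → b.length = l.length →
      (∀ i, i < l.length → b.getD i 0 = if i < k then uI l i else 1) →
      ((PySem.List.enumerate ys (k : Int)).foldl (f1 l) b).length = l.length ∧
      (∀ i, i < l.length →
        ((PySem.List.enumerate ys (k : Int)).foldl (f1 l) b).getD i 0 =
          if i < k + ys.length then uI l i else 1) := by
  intro ys
  induction ys with
  | nil =>
    intro k b _ hlen hinv
    simp only [PySem.List.enumerate_nil, List.foldl_nil, List.length_nil, Nat.add_zero]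
    exact ⟨hlen, hinv⟩
  | cons y ys' ih =>
    intro k b hys hlen hinv
    have hkl : k < l.length := by
      by_contra h
      rw [List.drop_eq_nil_of_le (by omega)] at hys
      simp at hys
    have hdrop : l.drop k = l[k] :: l.drop (k + 1) := List.drop_eq_getElem_cons hkl
    rw [hdrop] at hys
    obtain ⟨hy, hys'⟩ : y = l[k] ∧ ys' = l.drop (k + 1) := List.cons_eq_cons.mp hys
    have hyD : y = l.getD k 0 := by rw [hy, List.getD_eq_getElem l 0 hkl]
    rw [PySem.List.enumerate_cons, List.foldl_cons]
    have hcast : (k : Int) + 1 = ((k + 1 : Nat) : Int) := by push_cast; ring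
    rcases Nat.eq_zero_or_pos k with hk0 | hkpos
    · subst hk0
      have hstep : f1 l b (((0:Nat) : Int), y) = b := by simp [f1]
      rw [hstep, hcast]
      have h2 := ih 1 b (by simpa using hys') hlen (by
        intro i hi
        rw [hinv i hi]
        rcases Nat.eq_zero_or_pos i with h0 | h0
        · subst h0; simp [uI]
        · rw [if_neg (by omega), if_neg (by omega)])
      refine ⟨h2.1, fun i hi => ?_⟩
      rw [h2.2 i hi, List.length_cons]
      rw [show (0 : Nat) + (ys'.length + 1) = 1 + ys'.length from by omega]
    · -- k ≥ 1
      have hkne : ((k : Int) == 0) = false := by simp; omega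
      have hsub : (k : Int) - 1 = ((k - 1 : Nat) : Int) := by
        push_cast [Nat.cast_sub hkpos]; ring
      have hprev : PySem.List.pyGetD l ((k : Int) - 1) 0 = l.getD (k - 1) 0 := by
        rw [hsub, PySem.List.pyGetD_natCast]
      have hkk : k - 1 + 1 = k := by omega
      -- the update condition is exactly the uI step condition at index k
      have huIk : uI l k = if l.getD (k - 1) 0 < l.getD k 0 then uI l (k - 1) + 1 else 1 := by
        conv_lhs => rw [← hkk, uI]
        rw [hkk]
      by_cases hcond : l.getD (k - 1) 0 < l.getD k 0
      · have hstep : f1 l b (((k:Nat) : Int), y) =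
            b.set k (b.getD (k - 1) 0 + 1) := by
          simp only [f1, hkne, Bool.false_eq_true, if_false, hprev]
          rw [if_pos (by rw [hyD]; exact hcond)]
          rw [PySem.List.pySetD_natCast, hsub, PySem.List.pyGetD_natCast]
        rw [hstep, hcast]
        have hval : b.getD (k - 1) 0 + 1 = uI l k := by
          rw [huIk, if_pos hcond, hinv (k - 1) (by omega), if_pos (by omega)]
        have h2 := ih (k + 1) (b.set k (b.getD (k - 1) 0 + 1)) hys' (by rw [List.length_set]; exact hlen) (by
          intro i hi
          rw [getD_set_lt b k _ (by omega) i]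
          by_cases hik : i = k
          · subst hik; rw [if_pos rfl, if_pos (by omega)]; exact hval
          · rw [if_neg hik, hinv i hi]
            by_cases hi2 : i < k
            · rw [if_pos hi2, if_pos (by omega)]
            · rw [if_neg hi2, if_neg (by omega)])
        refine ⟨h2.1, fun i hi => ?_⟩
        rw [h2.2 i hi, List.length_cons]
        rw [show k + (ys'.length + 1) = k + 1 + ys'.length from by omega]
      · have hstep : f1 l b (((k:Nat) : Int), y) = b := by
          simp only [f1, hkne, Bool.false_eq_true, if_false, hprev]
          rw [if_neg (by rw [hyD]; exact hcond)]
        rw [hstep, hcast]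
        have h2 := ih (k + 1) b hys' hlen (by
          intro i hi
          rw [hinv i hi]
          by_cases hik : i = k
          · subst hik
            rw [if_neg (by omega), if_pos (by omega), huIk, if_neg hcond]
          · by_cases hi2 : i < k
            · rw [if_pos hi2, if_pos (by omega)]
            · rw [if_neg hi2, if_neg (by omega)])
        refine ⟨h2.1, fun i hi => ?_⟩
        rw [h2.2 i hi, List.length_cons]
        rw [show k + (ys'.length + 1) = k + 1 + ys'.length from by omega]


-- ===== pass 2 =====
lemma pass2 (l : List Int) :
    ∀ (ys : List Int) (J : Nat) (b : List Int),
      ys = l.reverse.drop J → b.length = l.length →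
      (∀ i, i < l.length → b.getD i 0 = if l.length - J ≤ i then mI l i else uI l i) →
      ((PySem.List.enumerate ys (J : Int)).foldl (f2 l) b).length = l.length ∧
      (∀ i, i < l.length →
        ((PySem.List.enumerate ys (J : Int)).foldl (f2 l) b).getD i 0 =
          if l.length - (J + ys.length) ≤ i then mI l i else uI l i) := by
  intro ys
  induction ys with
  | nil =>
    intro J b _ hlen hinv
    simp only [PySem.List.enumerate_nil, List.foldl_nil, List.length_nil, Nat.add_zero]
    exact ⟨hlen, hinv⟩
  | cons y ys' ih =>
    intro J b hys hlen hinv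
    have hJl : J < l.length := by
      by_contra h
      rw [List.drop_eq_nil_of_le (by simp; omega)] at hys
      simp at hys
    have hdrop : l.reverse.drop J = l.reverse[J]'(by simp; omega) :: l.reverse.drop (J + 1) :=
      List.drop_eq_getElem_cons (by simp; omega)
    rw [hdrop] at hys
    obtain ⟨hy, hys'⟩ : y = l.reverse[J]'(by simp; omega) ∧ ys' = l.reverse.drop (J + 1) :=
      List.cons_eq_cons.mp hys
    have hyD : y = l.getD (l.length - 1 - J) 0 := by
      rw [hy, List.getElem_reverse, List.getD_eq_getElem l 0 (by omega)]
    rw [PySem.List.enumerate_cons, List.foldl_cons]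
    have hcast : (J : Int) + 1 = ((J + 1 : Nat) : Int) := by push_cast; ring
    rcases Nat.eq_zero_or_pos J with hJ0 | hJpos
    · subst hJ0
      have hstep : f2 l b (((0:Nat) : Int), y) = b := by simp [f2]
      rw [hstep, hcast]
      have h2 := ih 1 b (by simpa using hys') hlen (by
        intro i hi
        rw [hinv i hi]
        by_cases h1 : l.length - 1 ≤ i
        · have hieq : i = l.length - 1 := by omega
          rw [if_pos h1, if_neg (by omega), hieq,
            key_nodesc l (l.length - 1) (by intro h; omega)]
        · rw [if_neg h1, if_neg (by omega)])
      refine ⟨h2.1, fun i hi => ?_⟩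
      rw [h2.2 i hi, List.length_cons]
      rw [show (0 : Nat) + (ys'.length + 1) = 1 + ys'.length from by omega]
    · -- J ≥ 1; the touched index is i0 = n - J - 1
      have hJne : ((J : Int) == 0) = false := by simp; omega
      set i0 : Nat := l.length - J - 1 with hi0
      have hlenl : PySem.List.len l = (l.length : Int) := PySem.List.len_eq l
      have hsub1 : (l.length : Int) - (J : Int) = ((i0 + 1 : Nat) : Int) := by
        push_cast; omega
      have hsub2 : ((i0 + 1 : Nat) : Int) - 1 = ((i0 : Nat) : Int) := by
        push_cast; ring
      have hy0 : y = l.getD i0 0 := by rw [hyD]; congr 1; omega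
      by_cases hcond : l.getD (i0 + 1) 0 < l.getD i0 0
      · have hstep : f2 l b (((J:Nat) : Int), y) =
            b.set i0 (max (b.getD (i0 + 1) 0 + 1) (b.getD i0 0)) := by
          simp only [f2, hJne, Bool.false_eq_true, if_false, hlenl, hsub1, hsub2,
            PySem.List.pyGetD_natCast, PySem.List.pySetD_natCast]
          rw [if_pos (by rw [hy0]; exact hcond)]
        rw [hstep, hcast]
        have hval : max (b.getD (i0 + 1) 0 + 1) (b.getD i0 0) = mI l i0 := by
          rw [hinv (i0 + 1) (by omega), if_pos (by omega),
              hinv i0 (by omega), if_neg (by omega)]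
          exact key_desc l i0 (by omega) hcond
        have h2 := ih (J + 1) (b.set i0 (max (b.getD (i0 + 1) 0 + 1) (b.getD i0 0))) hys'
          (by rw [List.length_set]; exact hlen) (by
          intro i hi
          rw [getD_set_lt b i0 _ (by omega) i]
          by_cases hik : i = i0
          · subst hik; rw [if_pos rfl, if_pos (by omega)]; exact hval
          · rw [if_neg hik, hinv i hi]
            by_cases hi2 : l.length - J ≤ i
            · rw [if_pos hi2, if_pos (by omega)]
            · rw [if_neg hi2, if_neg (by omega)])
        refine ⟨h2.1, fun i hi => ?_⟩
        rw [h2.2 i hi, List.length_cons]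
        rw [show J + (ys'.length + 1) = J + 1 + ys'.length from by omega]
      · have hstep : f2 l b (((J:Nat) : Int), y) = b := by
          simp only [f2, hJne, Bool.false_eq_true, if_false, hlenl, hsub1,
            PySem.List.pyGetD_natCast]
          rw [if_neg (by rw [hy0]; exact hcond)]
        rw [hstep, hcast]
        have h2 := ih (J + 1) b hys' hlen (by
          intro i hi
          rw [hinv i hi]
          by_cases hik : i = i0
          · subst hik
            rw [if_neg (by omega), if_pos (by omega),
              key_nodesc l i0 (by intro h; exact hcond h.2)]
          · by_cases hi2 : l.length - J ≤ i
            · rw [if_pos hi2, if_pos (by omega)]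
            · rw [if_neg hi2, if_neg (by omega)])
        refine ⟨h2.1, fun i hi => ?_⟩
        rw [h2.2 i hi, List.length_cons]
        rw [show J + (ys'.length + 1) = J + 1 + ys'.length from by omega]


-- ===== B side: the run-sweep produces the same pointwise values =====
lemma bGoD_ge (l : List Int) (i : Nat) : ∀ c, c ≤ bGoD l i c := by
  intro c
  rw [bGoD]
  split
  · have := bGoD_ge l i (c + 1); omega
  · omega
termination_by c => l.length - (i + c)
decreasing_by omega

lemma bGoD_end (l : List Int) (i c : Nat) :
    ¬ (i + bGoD l i c + 1 < l.length ∧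
       l.getD (i + bGoD l i c + 1) 0 < l.getD (i + bGoD l i c) 0) := by
  by_cases h : i + c + 1 < l.length ∧ l.getD (i + c + 1) 0 < l.getD (i + c) 0
  · rw [bGoD, if_pos h]; exact bGoD_end l i (c + 1)
  · rw [bGoD, if_neg h]; exact h
termination_by l.length - (i + c)
decreasing_by omega

lemma bGoD_desc (l : List Int) (i : Nat) :
    ∀ c t, c ≤ t → t < bGoD l i c →
      i + t + 1 < l.length ∧ l.getD (i + t + 1) 0 < l.getD (i + t) 0 := by
  intro c t hct htd
  rw [bGoD] at htd
  split at htd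
  · next h =>
    rcases Nat.eq_or_lt_of_le hct with hEq | hlt
    · subst hEq; exact h
    · exact bGoD_desc l i (c + 1) t hlt htd
  · omega
termination_by c => l.length - (i + c)
decreasing_by omega

lemma dI_run (l : List Int) (i d : Nat)
    (hdesc : ∀ t, t < d → i + t + 1 < l.length ∧ l.getD (i + t + 1) 0 < l.getD (i + t) 0)
    (hend : ¬ (i + d + 1 < l.length ∧ l.getD (i + d + 1) 0 < l.getD (i + d) 0)) :
    ∀ t, t ≤ d → dI l (i + t) = ((d - t : Nat) : Int) + 1 := by
  have main : ∀ s, ∀ t, t ≤ d → d - t = s → dI l (i + t) = ((d - t : Nat) : Int) + 1 := by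
    intro s
    induction s with
    | zero =>
      intro t ht hs
      have htd : t = d := by omega
      rw [htd, dI_last l (i + d) hend]
      simp
    | succ s ihs =>
      intro t ht hs
      have htd : t < d := by omega
      have hstep : dI l (i + t) = dI l (i + t + 1) + 1 := by
        rw [dI, if_pos (hdesc t htd)]
      rw [hstep, show i + t + 1 = i + (t + 1) from by omega,
          ihs (t + 1) (by omega) (by omega)]
      omega
  intro t ht
  exact main (d - t) t ht rfl

lemma uI_run (l : List Int) (i d : Nat)
    (hdesc : ∀ t, t < d → i + t + 1 < l.length ∧ l.getD (i + t + 1) 0 < l.getD (i + t) 0) :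
    ∀ t, 1 ≤ t → t ≤ d → uI l (i + t) = 1 := by
  intro t h1 h2
  obtain ⟨t', rfl⟩ : ∃ t', t = t' + 1 := ⟨t - 1, by omega⟩
  rw [show i + (t' + 1) = (i + t') + 1 from by omega]
  exact uI_succ_of_desc l (i + t') (hdesc t' (by omega)).2

-- the emitted block for one run equals the reference values on it
lemma block_eq (l : List Int) (i d : Nat) (up : Int) (hup : up = uI l i)
    (hdesc : ∀ t, t < d → i + t + 1 < l.length ∧ l.getD (i + t + 1) 0 < l.getD (i + t) 0)
    (hend : ¬ (i + d + 1 < l.length ∧ l.getD (i + d + 1) 0 < l.getD (i + d) 0)) :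
    max up ((d : Int) + 1) :: PySem.List.pyRange (d : Int) 0 (-1) =
      (List.range (d + 1)).map (fun t => mI l (i + t)) := by
  rw [List.range_succ_eq_map, List.map_cons, List.map_map]
  congr 1
  · have h0 : dI l (i + 0) = ((d - 0 : Nat) : Int) + 1 := dI_run l i d hdesc hend 0 (by omega)
    simp only [Nat.add_zero, Nat.sub_zero] at h0
    simp [mI, h0, hup]
  · rw [PySem.List.pyRange_neg_one]
    simp only [Int.sub_zero, Int.toNat_natCast]
    apply List.map_congr_left
    intro t ht
    rw [List.mem_range] at ht
    have hu : uI l (i + (t + 1)) = 1 := uI_run l i d hdesc (t + 1) (by omega) (by omega)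
    have hd : dI l (i + (t + 1)) = ((d - (t + 1) : Nat) : Int) + 1 :=
      dI_run l i d hdesc hend (t + 1) (by omega)
    simp only [Function.comp, mI, Nat.succ_eq_add_one, hu, hd]
    have : ((d - (t + 1) : Nat) : Int) = (d : Int) - t - 1 := by omega
    rw [this]
    omega

lemma bGo_spec (l : List Int) :
    ∀ (m i : Nat) (up : Int) (res : List Int), l.length - i ≤ m →
      (i < l.length → up = uI l i) →
      bGo l up i res = res ++ (List.range (l.length - i)).map (fun t => mI l (i + t)) := by
  intro m
  induction m with
  | zero =>
    intro i up res hm _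
    rw [bGo, dif_neg (by omega)]
    rw [show l.length - i = 0 from by omega]
    simp
  | succ m ihm =>
    intro i up res hm hup
    rw [bGo]
    by_cases hi : i < l.length
    · rw [dif_pos hi]
      simp only []
      set d := bGoD l i 0 with hd
      have hdesc : ∀ t, t < d → i + t + 1 < l.length ∧ l.getD (i + t + 1) 0 < l.getD (i + t) 0 :=
        fun t ht => bGoD_desc l i 0 t (Nat.zero_le t) ht
      have hend := bGoD_end l i 0
      rw [← hd] at hend
      have hidl : i + d < l.length := by
        rcases Nat.eq_zero_or_pos d with h0 | h0
        · omega
        · have := (hdesc (d - 1) (by omega)).1; omega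
      have hupi := hup hi
      -- value of the last emitted element: it is uI l (i + d)
      have hlast : PySem.List.pyGetD
          ((res ++ [max up ((d : Int) + 1)]) ++ PySem.List.pyRange (d : Int) 0 (-1)) (-1) 0 =
          uI l (i + d) := by
        rcases Nat.eq_zero_or_pos d with h0 | h0
        · rw [h0]
          rw [show ((0 : Nat) : Int) = (0 : Int) from rfl, PySem.List.pyRange_neg_one_eq_nil (by omega)]
          rw [List.append_nil, PySem.List.pyGetD_neg_one_append_singleton]
          have := uI_pos l i
          have := uI_pos l i
          simp only [Nat.add_zero, ← hupi]
          omega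
        · have hsplit : PySem.List.pyRange (d : Int) 0 (-1) =
              (PySem.List.pyRange 2 ((d : Int) + 1) 1).reverse ++ [1] := by
            rw [PySem.List.pyRange_neg_one_eq_reverse]
            rw [show (0 : Int) + 1 = 1 from rfl]
            rw [PySem.List.pyRange_one_cons (by omega), List.reverse_cons]
            norm_num
          rw [hsplit, ← List.append_assoc, PySem.List.pyGetD_neg_one_append_singleton]
          rw [uI_run l i d hdesc d h0 (le_refl d)]
      rw [hlast]
      have hup' : i + d + 1 < l.length →
          (if i + d + 1 < l.length then
              (if l.getD (i + d + 1) 0 > l.getD (i + d) 0 then uI l (i + d) + 1 else 1)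
            else up) = uI l (i + d + 1) := by
        intro h
        rw [if_pos h, show i + d + 1 = (i + d) + 1 from rfl, uI]
      rw [ihm (i + d + 1) _ _ (by omega) hup']
      -- assemble:  range (n - i) = range (d+1) ++ shifted range (n - (i+d+1))
      have hsplit : l.length - i = (d + 1) + (l.length - (i + d + 1)) := by omega
      rw [hsplit, List.range_add, List.map_append, List.map_map]
      rw [← block_eq l i d up hupi hdesc hend]
      simp only [List.append_assoc, List.cons_append, List.nil_append, Function.comp_def,
        show ∀ t, i + d + 1 + t = i + (d + 1 + t) from fun t => by omega]
    · rw [dif_neg hi]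
      rw [show l.length - i = 0 from by omega]
      simp

theorem bonuses_spec : Claim_equal_bonuses := by
  unfold Claim_equal_bonuses
  intro l _
  unfold Spec_bonuses
  show (PySem.List.enumerate l.reverse (((0:Nat):Int))).foldl (f2 l)
      ((PySem.List.enumerate l (((0:Nat):Int))).foldl (f1 l) (List.replicate l.length 1)) =
      bonuses_alt l
  have h1 := pass1 l l 0 (List.replicate l.length 1) (by simp) (by simp) (by
    intro i hi
    rw [if_neg (by omega)]
    simp [List.getD_eq_getElem?_getD, hi])
  have h2 := pass2 l l.reverse 0 _ (by simp) h1.1 (by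
    intro i hi
    rw [h1.2 i hi, if_pos (by omega), if_neg (by omega)])
  have hB : bonuses_alt l = (List.range l.length).map (fun t => mI l t) := by
    unfold bonuses_alt
    rw [bGo_spec l l.length 0 1 [] (by omega) (fun _ => by simp [uI])]
    simp
  rw [hB]
  apply List.ext_getElem
  · rw [h2.1]; simp
  · intro i hi1 hi2
    have hil : i < l.length := by simpa using hi2
    rw [← List.getD_eq_getElem _ 0 hi1, h2.2 i hil, if_pos (by simp)]
    simp
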